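-- pv_equiv track=rewrite | github.com/Laarzmo/30DaysOfPython | day_11/exercise.py | sum_of_odds
-- ===== SOURCE A (Python) =====
-- def sum_of_odds(n):
--     to= te = 0
--     for i in range(n+1):
--         if i % 2 == 0 :
--             te += 1
--         else:
--             to += 1
--     return(to,te)
-- ===== SOURCE B (Python) =====
-- def sum_of_odds(n):
--     if n < 0:
--         return (0, 0)
--     return ((n + 1) // 2, n // 2 + 1)
-- ===== Notes on version B (the rewrite author's own statement) =====
-- stated objective: faster
-- what changed: replaces the linear counting loop over the range with closed-form floor-division formulas for the odd and even counts (empty-range case returns zero counts directly)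
import Mathlib
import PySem

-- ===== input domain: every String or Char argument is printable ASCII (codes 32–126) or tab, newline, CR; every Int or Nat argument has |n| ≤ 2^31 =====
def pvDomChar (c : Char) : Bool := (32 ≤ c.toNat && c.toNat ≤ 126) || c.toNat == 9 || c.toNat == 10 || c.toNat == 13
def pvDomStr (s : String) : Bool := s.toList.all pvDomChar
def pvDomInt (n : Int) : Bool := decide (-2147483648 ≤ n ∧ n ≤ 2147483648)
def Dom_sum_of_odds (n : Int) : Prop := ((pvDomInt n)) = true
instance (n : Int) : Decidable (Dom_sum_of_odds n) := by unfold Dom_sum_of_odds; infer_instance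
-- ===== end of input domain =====

-- B replaces A's O(n) counting loop by the closed forms odds=(n+1)//2, evens=n//2+1 (objective: faster).

-- ===== PORT A =====
def sum_of_odds (n : Int) : List Int :=
  let st := (PySem.List.pyRange 0 (n + 1) 1).foldl
    (fun (acc : Int × Int) i =>
      if PySem.Int.mod i 2 = 0 then (acc.1, acc.2 + 1) else (acc.1 + 1, acc.2))
    (0, 0)
  [st.1, st.2]

-- ===== PORT B =====
def sum_of_odds_alt (n : Int) : List Int :=
  if n < 0 then [0, 0]
  else [PySem.Int.floordiv (n + 1) 2, PySem.Int.floordiv n 2 + 1]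

-- ===== PRECONDITION & SPEC =====
def Spec_sum_of_odds (n : Int) (out : List Int) : Prop := out = sum_of_odds_alt n
instance (n : Int) (out : List Int) : Decidable (Spec_sum_of_odds n out) := by unfold Spec_sum_of_odds; infer_instance

-- ===== CLAIM (what is proved, stated in full; the proofs are below) =====
def Claim_equal_sum_of_odds : Prop := ∀ (n : Int), Dom_sum_of_odds n → Spec_sum_of_odds n (sum_of_odds n)

-- ===== LEMMAS AND PROOFS =====

-- A's loop over range(0, m) counts m/2 odds and (m+1)/2 evens (Nat division).
theorem sum_of_odds_loop (m : Nat) :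
    (PySem.List.pyRange 0 (m : Int) 1).foldl
      (fun (acc : Int × Int) i =>
        if PySem.Int.mod i 2 = 0 then (acc.1, acc.2 + 1) else (acc.1 + 1, acc.2))
      (0, 0) = (((m / 2 : Nat) : Int), (((m + 1) / 2 : Nat) : Int)) := by
  induction m with
  | zero =>
    have hr : PySem.List.pyRange 0 ((0:Nat) : Int) 1 = [] := by
      rw [PySem.List.pyRange_one]; norm_num
    rw [hr]; norm_num
  | succ m ih =>
    have h : PySem.List.pyRange 0 ((m : Int) + 1) 1 = PySem.List.pyRange 0 (m : Int) 1 ++ [(m : Int)] :=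
      PySem.List.pyRange_one_succ_right (by positivity)
    push_cast
    rw [h, List.foldl_append, ih]
    have hm : PySem.Int.mod (m : Int) 2 = ((m % 2 : Nat) : Int) := by
      simp only [PySem.Int.mod, Int.fmod_eq_emod]
      norm_num
    rcases Nat.even_or_odd m with he | ho
    · obtain ⟨k, hk⟩ := he
      simp only [List.foldl, hm]
      rw [if_pos (by omega)]
      rw [Prod.mk.injEq]
      constructor <;> omega
    · obtain ⟨k, hk⟩ := ho
      simp only [List.foldl, hm]
      rw [if_neg (by omega)]
      rw [Prod.mk.injEq]
      constructor <;> omega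

-- ===== VERDICT (by name: the statement is the Claim_ definition above) =====
theorem sum_of_odds_spec : Claim_equal_sum_of_odds := by
  intro n _
  unfold Spec_sum_of_odds sum_of_odds sum_of_odds_alt
  by_cases hn : n < 0
  · have : n + 1 ≤ 0 := by omega
    have hr : PySem.List.pyRange 0 (n + 1) 1 = [] := by
      rw [PySem.List.pyRange_one]
      rw [(by omega : (n + 1 - 0).toNat = 0)]
      simp
    rw [if_pos hn, hr]
    simp
  · rw [if_neg hn]
    obtain ⟨m, rfl⟩ := Int.eq_ofNat_of_zero_le (by omega : (0:Int) ≤ n)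
    have h1 : ((m : Int) + 1) = ((m + 1 : Nat) : Int) := by push_cast; ring
    rw [h1, sum_of_odds_loop]
    have e1 : PySem.Int.floordiv ((m : Int) + 1) 2 = (((m + 1) / 2 : Nat) : Int) := by
      rw [h1]; exact_mod_cast PySem.Int.floordiv_natCast (m + 1) 2
    have e2 : PySem.Int.floordiv (m : Int) 2 = ((m / 2 : Nat) : Int) := by
      exact_mod_cast PySem.Int.floordiv_natCast m 2
    rw [← h1, e1, e2]
    simp only []
    have : (m + 1 + 1) / 2 = m / 2 + 1 := by omega
    rw [this]
    push_cast
    rfl
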